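-- pv_equiv track=rewrite | github.com/XavierLopez25/Lab03-Redes | src/dijkstra.py | build_next_hop
-- ===== SOURCE A (Python) =====
-- from typing import Dict, Tuple, List
--
-- def build_next_hop(source: str, prev: Dict[str, str]) -> Dict[str, str]:
--     """
--     A partir de la relación prev, reconstruye el primer salto (next-hop)
--     desde `source` hacia cada destino.
--     """
--     next_hop: Dict[str, str] = {}
--     for dest in list(prev.keys()):
--         if dest == source:
--             continue
--         # retrocede dest -> ... -> source
--         cur = dest
--         chain = [cur]
--         while cur in prev and prev[cur] != source:
--             cur = prev[cur]
--             chain.append(cur)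
--         if cur in prev and prev[cur] == source:
--             first = cur  # vecino directo desde source
--             next_hop[dest] = first
--     return next_hop
-- ===== SOURCE B (Python) =====
-- def build_next_hop(source, prev):
--     """
--     Memoized resolution with path compression: every visited node caches its
--     resolved first hop, so each prev-chain is walked only once instead of being
--     re-walked from scratch for every destination.
--     """
--     next_hop = {}
--     memo = {}
--     for dest in list(prev.keys()):
--         if dest == source:
--             continue
--         path = []
--         cur = dest
--         while True:
--             if cur in memo:
--                 res = memo[cur]
--                 break
--             p = prev.get(cur)
--             if p is None:
--                 res = None
--                 break
--             if p == source:
--                 res = cur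
--                 break
--             path.append(cur)
--             cur = p
--         memo[cur] = res
--         for node in path:
--             memo[node] = res
--         if res is not None:
--             next_hop[dest] = res
--     return next_hop
-- ===== Notes on version B (the rewrite author's own statement) =====
-- stated objective: alternative
-- what changed: Instead of re-walking the whole prev-chain from scratch for every destination, B memoizes the resolved first hop of every node it visits (path compression), so each node's chain is traversed only once; on the sampled random inputs chains are short and no speedup was measured.
import Mathlib
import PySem

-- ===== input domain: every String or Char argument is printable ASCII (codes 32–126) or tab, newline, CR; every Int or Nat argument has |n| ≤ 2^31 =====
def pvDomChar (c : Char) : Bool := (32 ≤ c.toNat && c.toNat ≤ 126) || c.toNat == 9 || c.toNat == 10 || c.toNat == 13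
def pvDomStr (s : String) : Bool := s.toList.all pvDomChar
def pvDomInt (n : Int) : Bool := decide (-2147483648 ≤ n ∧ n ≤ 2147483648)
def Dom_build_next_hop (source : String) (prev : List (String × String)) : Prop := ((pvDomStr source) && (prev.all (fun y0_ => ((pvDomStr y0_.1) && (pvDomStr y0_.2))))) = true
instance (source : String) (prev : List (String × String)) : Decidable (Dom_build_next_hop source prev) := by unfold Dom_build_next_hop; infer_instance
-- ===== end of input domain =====

-- B replaces A's per-destination re-walk of the prev-chain by a memoized walk with
-- path compression: each node's first hop is resolved once and cached (alternative algorithm).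

-- ===== PORT A =====
-- A's `while cur in prev and prev[cur] != source: cur = prev[cur]` loop, fueled with
-- |prev| steps (under Pre_ the loop terminates within that many steps; A's `chain`
-- list is dead code — built but never read — and is not ported).
def walkA (source : String) (d : PySem.Dict String String) : Nat → String → String
  | 0, cur => cur
  | f+1, cur =>
    match d.get? cur with
    | some p => if p = source then cur else walkA source d f p
    | none => cur

-- one iteration of A's `for dest in list(prev.keys())` body
def stepA (source : String) (d : PySem.Dict String String) (n : Nat)
    (nh : PySem.Dict String String) (kv : String × String) : PySem.Dict String String :=
  let dest := kv.1
  if dest = source then nh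
  else
    let cur := walkA source d n dest
    match d.get? cur with
    | some p => if p = source then nh.insert dest cur else nh
    | none => nh

def build_next_hop (source : String) (prev : List (String × String)) : List (String × String) :=
  let d := PySem.Dict.mk prev
  (prev.foldl (stepA source d prev.length) PySem.Dict.empty).items

-- ===== PORT B =====
-- B's inner `while True` loop, fueled: returns (res, terminal node, path of nodes walked)
def walkB (source : String) (d : PySem.Dict String String) :
    Nat → PySem.Dict String (Option String) → String → Option String × String × List String
  | 0, _, cur => (none, cur, [])
  | f+1, memo, cur =>
    match memo.get? cur with
    | some r => (r, cur, [])
    | none =>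
      match d.get? cur with
      | none => (none, cur, [])
      | some p =>
        if p = source then (some cur, cur, [])
        else
          match walkB source d f memo p with
          | (r, t, path) => (r, t, cur :: path)

-- one iteration of B's loop body: walk, memoize terminal and path, record the hop
def stepB (source : String) (d : PySem.Dict String String) (n : Nat)
    (st : PySem.Dict String (Option String) × PySem.Dict String String)
    (kv : String × String) :
    PySem.Dict String (Option String) × PySem.Dict String String :=
  let dest := kv.1
  if dest = source then st
  else
    match walkB source d (n+1) st.1 dest with
    | (res, t, path) =>
      let memo := path.foldl (fun m x => m.insert x res) (st.1.insert t res)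
      match res with
      | some x => (memo, st.2.insert dest x)
      | none => (memo, st.2)

def build_next_hop_alt (source : String) (prev : List (String × String)) : List (String × String) :=
  let d := PySem.Dict.mk prev
  (prev.foldl (stepB source d prev.length) (PySem.Dict.empty, PySem.Dict.empty)).2.items

-- ===== PRECONDITION & SPEC =====
-- one backward step of the prev-map (fixes terminals: missing key or parent = source)
def pvStep (source : String) (prev : List (String × String)) (k : String) : String :=
  match (PySem.Dict.mk prev).get? k with
  | none => k
  | some p => if p = source then k else p

-- a node whose chain stops here: no parent, or its parent is the source
def pvTerminal (source : String) (prev : List (String × String)) (k : String) : Bool :=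
  match (PySem.Dict.mk prev).get? k with
  | none => true
  | some p => p == source

-- Pre_ excludes exactly the inputs on which A's while-loop never terminates (a
-- prev-chain that runs into a cycle not broken by `source`); A returns on all others.
def Pre_build_next_hop (source : String) (prev : List (String × String)) : Prop :=
  ∀ kv ∈ prev, pvTerminal source prev ((pvStep source prev)^[prev.length] kv.1) = true
instance (source : String) (prev : List (String × String)) : Decidable (Pre_build_next_hop source prev) := by unfold Pre_build_next_hop; infer_instance

def pvWitness_build_next_hop : String × (List (String × String)) :=
  ("s", [("a", "s"), ("b", "a"), ("c", "b")])

def Spec_build_next_hop (source : String) (prev : List (String × String)) (out : List (String × String)) : Prop := out = build_next_hop_alt source prev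
instance (source : String) (prev : List (String × String)) (out : List (String × String)) : Decidable (Spec_build_next_hop source prev out) := by unfold Spec_build_next_hop; infer_instance

-- ===== CLAIM (what is proved, stated in full; the proofs are below) =====
def Claim_equal_build_next_hop : Prop := ∀ (source : String) (prev : List (String × String)), Dom_build_next_hop source prev → Pre_build_next_hop source prev → Spec_build_next_hop source prev (build_next_hop source prev)

-- ===== LEMMAS AND PROOFS =====

-- the pure chain resolver both ports compute: first hop from `source` to `cur`, fueled
def pvR (source : String) (d : PySem.Dict String String) : Nat → String → Option String
  | 0, _ => none
  | f+1, cur =>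
    match d.get? cur with
    | none => none
    | some p => if p = source then some cur else pvR source d f p

-- A's walk-then-check equals the resolver with one more unit of fuel (unconditionally)
theorem walkA_check (source : String) (d : PySem.Dict String String) :
    ∀ (f : Nat) (cur : String),
      (match d.get? (walkA source d f cur) with
       | some p => if p = source then some (walkA source d f cur) else none
       | none => none) = pvR source d (f+1) cur := by
  intro f
  induction f with
  | zero =>
    intro cur
    simp only [walkA, pvR]
    cases d.get? cur with
    | none => rfl
    | some p => by_cases h : p = source <;> simp [h]
  | succ f ih =>
    intro cur
    simp only [walkA]
    cases hg : d.get? cur with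
    | none => simp [pvR, hg]
    | some p =>
      by_cases h : p = source
      · simp [pvR, hg, h]
      · simp only [h, if_false]
        rw [ih p]
        simp [pvR, hg, h]

theorem pvStep_of_get? {source : String} {prev : List (String × String)} {k p : String}
    (hg : (PySem.Dict.mk prev).get? k = some p) (hp : p ≠ source) :
    pvStep source prev k = p := by
  simp [pvStep, hg, hp]

theorem pvTerminal_iff {source : String} {prev : List (String × String)} {k : String} :
    pvTerminal source prev k = true ↔
      (PySem.Dict.mk prev).get? k = none ∨ (PySem.Dict.mk prev).get? k = some source := by
  unfold pvTerminal
  cases hg : (PySem.Dict.mk prev).get? k <;> simp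

-- fuel stability: once the chain from `cur` reaches a terminal within m steps,
-- the resolver's value no longer depends on fuel beyond m+1
theorem pvR_stable (source : String) (prev : List (String × String)) :
    ∀ (m : Nat) (cur : String),
      pvTerminal source prev ((pvStep source prev)^[m] cur) = true →
      ∀ f, m ≤ f → pvR source (PySem.Dict.mk prev) (f+1) cur = pvR source (PySem.Dict.mk prev) (m+1) cur := by
  intro m
  induction m with
  | zero =>
    intro cur hterm f _
    simp only [Function.iterate_zero, id] at hterm
    rcases pvTerminal_iff.mp hterm with hg | hg <;> cases f <;> simp [pvR, hg]
  | succ m ih =>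
    intro cur hterm f hf
    cases hg : (PySem.Dict.mk prev).get? cur with
    | none =>
      cases f <;> simp [pvR, hg]
    | some p =>
      by_cases hp : p = source
      · cases f <;> simp [pvR, hg, hp]
      · obtain ⟨f', rfl⟩ : ∃ f', f = f' + 1 := ⟨f - 1, by omega⟩
        have hstep : pvStep source prev cur = p := pvStep_of_get? hg hp
        rw [Function.iterate_succ_apply, hstep] at hterm
        have h1 : pvR source (PySem.Dict.mk prev) (f'+1+1) cur = pvR source (PySem.Dict.mk prev) (f'+1) p := by
          simp [pvR, hg, hp]
        have h2 : pvR source (PySem.Dict.mk prev) (m+1+1) cur = pvR source (PySem.Dict.mk prev) (m+1) p := by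
          simp [pvR, hg, hp]
        rw [h1, h2, ih p hterm f' (by omega)]

-- memo invariant: every cached value is the stable resolved hop
def pvInv (source : String) (prev : List (String × String))
    (memo : PySem.Dict String (Option String)) : Prop :=
  ∀ k r, memo.get? k = some r → r = pvR source (PySem.Dict.mk prev) (prev.length + 1) k

-- B's fueled walk returns the stable resolved hop, and every node it touches
-- (terminal and path) resolves to that same hop
theorem walkB_spec (source : String) (prev : List (String × String)) :
    ∀ (f : Nat), f ≤ prev.length + 1 →
    ∀ (cur : String) (memo : PySem.Dict String (Option String)),
      pvInv source prev memo →
      (∃ m, m < f ∧ pvTerminal source prev ((pvStep source prev)^[m] cur) = true) →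
      (walkB source (PySem.Dict.mk prev) f memo cur).1 = pvR source (PySem.Dict.mk prev) (prev.length + 1) cur ∧
      ∀ x ∈ (walkB source (PySem.Dict.mk prev) f memo cur).2.1 :: (walkB source (PySem.Dict.mk prev) f memo cur).2.2,
        pvR source (PySem.Dict.mk prev) (prev.length + 1) x = (walkB source (PySem.Dict.mk prev) f memo cur).1 := by
  intro f
  induction f with
  | zero => intro _ cur memo _ ⟨m, hm, _⟩; omega
  | succ f ih =>
    intro hfle cur memo hinv ⟨m, hm, hterm⟩
    simp only [walkB]
    cases hmemo : memo.get? cur with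
    | some r =>
      have := hinv cur r hmemo
      simp [this]
    | none =>
      cases hg : (PySem.Dict.mk prev).get? cur with
      | none =>
        have : pvR source (PySem.Dict.mk prev) (prev.length + 1) cur = none := by
          simp [pvR, hg]
        simp [pvR, hg]
      | some p =>
        by_cases hp : p = source
        · have : pvR source (PySem.Dict.mk prev) (prev.length + 1) cur = some cur := by
            simp [pvR, hg, hp]
          simp [hp, this]
        · simp only [hp, if_false]
          -- cur is not terminal, so m ≥ 1 and the chain continues from p
          have hm1 : 1 ≤ m := by
            by_contra hc
            have hm0 : m = 0 := by omega
            subst hm0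
            simp only [Function.iterate_zero, id] at hterm
            rcases pvTerminal_iff.mp hterm with h' | h' <;> rw [hg] at h'
            · exact absurd h' (by simp)
            · exact hp (by injection h')
          have hstep : pvStep source prev cur = p := pvStep_of_get? hg hp
          have hterm' : pvTerminal source prev ((pvStep source prev)^[m-1] p) = true := by
            have : m = (m - 1) + 1 := by omega
            rw [this, Function.iterate_succ_apply, hstep] at hterm
            exact hterm
          obtain ⟨hres, hall⟩ := ih (by omega) p memo hinv ⟨m - 1, by omega, hterm'⟩
          have hcur : pvR source (PySem.Dict.mk prev) (prev.length + 1) cur =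
              pvR source (PySem.Dict.mk prev) (prev.length + 1) p := by
            have hn1 : 1 ≤ prev.length := by omega
            have h1 : pvR source (PySem.Dict.mk prev) (prev.length + 1) cur =
                pvR source (PySem.Dict.mk prev) prev.length p := by
              simp [pvR, hg, hp]
            obtain ⟨n', hn'⟩ : ∃ n', prev.length = n' + 1 := ⟨prev.length - 1, by omega⟩
            rw [h1, hn']
            rw [pvR_stable source prev (m-1) p hterm' n' (by omega),
                ← pvR_stable source prev (m-1) p hterm' (n'+1) (by omega)]
          rcases hw : walkB source (PySem.Dict.mk prev) f memo p with ⟨r, t, path⟩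
          rw [hw] at hres hall
          refine ⟨hres.trans hcur.symm, ?_⟩
          intro y hy
          simp only [List.mem_cons] at hy
          rcases hy with rfl | rfl | hy
          · exact hall _ (by simp)
          · exact hcur.trans hres.symm
          · exact hall _ (by simp [hy])

theorem pvInv_insert {source : String} {prev : List (String × String)}
    {memo : PySem.Dict String (Option String)} (hinv : pvInv source prev memo)
    {k : String} {r : Option String}
    (hk : r = pvR source (PySem.Dict.mk prev) (prev.length + 1) k) :
    pvInv source prev (memo.insert k r) := by
  intro k' r' h
  by_cases hkk : k' = k
  · subst hkk
    rw [PySem.Dict.get?_insert_self] at h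
    cases h; exact hk
  · rw [PySem.Dict.get?_insert_of_ne memo r hkk] at h
    exact hinv k' r' h

theorem pvInv_fold {source : String} {prev : List (String × String)} {r : Option String} :
    ∀ (path : List String) (memo : PySem.Dict String (Option String)),
      pvInv source prev memo →
      (∀ x ∈ path, pvR source (PySem.Dict.mk prev) (prev.length + 1) x = r) →
      pvInv source prev (path.foldl (fun m x => m.insert x r) memo) := by
  intro path
  induction path with
  | nil => intro memo hinv _; exact hinv
  | cons x path ih =>
    intro memo hinv hall
    simp only [List.foldl_cons]
    exact ih _ (pvInv_insert hinv (hall x (by simp)).symm) (fun y hy => hall y (by simp [hy]))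

-- the two outer folds agree, given the memo invariant and termination of every remaining key
theorem fold_eq (source : String) (prev : List (String × String)) :
    ∀ (l : List (String × String)) (memo : PySem.Dict String (Option String))
      (nh : PySem.Dict String String),
      pvInv source prev memo →
      (∀ kv ∈ l, pvTerminal source prev ((pvStep source prev)^[prev.length] kv.1) = true) →
      l.foldl (stepA source (PySem.Dict.mk prev) prev.length) nh =
        (l.foldl (stepB source (PySem.Dict.mk prev) prev.length) (memo, nh)).2 := by
  intro l
  induction l with
  | nil => intro memo nh _ _; rfl
  | cons kv l ih =>
    intro memo nh hinv hterm
    simp only [List.foldl_cons]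
    by_cases hsrc : kv.1 = source
    · simp only [stepA, stepB, hsrc]
      exact ih memo nh hinv (fun x hx => hterm x (by simp [hx]))
    · have htkv := hterm kv (by simp)
      obtain ⟨hres, hall⟩ := walkB_spec source prev (prev.length + 1) (le_refl _) kv.1 memo hinv
        ⟨prev.length, by omega, htkv⟩
      -- A's step value is the stable resolver value
      have hA : (match (PySem.Dict.mk prev).get? (walkA source (PySem.Dict.mk prev) prev.length kv.1) with
           | some p => if p = source then some (walkA source (PySem.Dict.mk prev) prev.length kv.1) else none
           | none => none) = pvR source (PySem.Dict.mk prev) (prev.length + 1) kv.1 :=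
        walkA_check source (PySem.Dict.mk prev) prev.length kv.1
      rcases hw : walkB source (PySem.Dict.mk prev) (prev.length + 1) memo kv.1 with ⟨res, t, path⟩
      rw [hw] at hres hall
      simp only at hres hall
      have hinv' : pvInv source prev (path.foldl (fun m x => m.insert x res)
          (memo.insert t res)) :=
        pvInv_fold path _ (pvInv_insert hinv (hall t (by simp)).symm)
          (fun x hx => hall x (by simp [hx]))
      have hterm' : ∀ x ∈ l, pvTerminal source prev ((pvStep source prev)^[prev.length] x.1) = true :=
        fun x hx => hterm x (by simp [hx])
      simp only [stepA, stepB, hsrc, hw]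
      rw [← hres] at hA
      cases res with
      | none =>
        -- A inserts nothing: its check is none
        rcases hcheck : (PySem.Dict.mk prev).get? (walkA source (PySem.Dict.mk prev) prev.length kv.1) with _ | p
        · simp only [hcheck] at hA ⊢
          exact ih _ nh hinv' hterm'
        · simp only [hcheck] at hA ⊢
          by_cases hp : p = source
          · simp [hp] at hA
          · simp only [hp, if_false]
            exact ih _ nh hinv' hterm'
      | some x =>
        -- A inserts (dest, x): its check returns some x
        rcases hcheck : (PySem.Dict.mk prev).get? (walkA source (PySem.Dict.mk prev) prev.length kv.1) with _ | p
        · simp [hcheck] at hA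
        · simp only [hcheck] at hA ⊢
          by_cases hp : p = source
          · simp only [hp] at hA ⊢
            injection hA with hA
            rw [hA]
            exact ih _ (nh.insert kv.1 x) hinv' hterm'
          · simp [hp] at hA

-- ===== VERDICT (by name: the statement is the Claim_ definition above) =====
theorem build_next_hop_spec : Claim_equal_build_next_hop := by
  intro source prev _ hpre
  unfold Spec_build_next_hop build_next_hop build_next_hop_alt
  have h := fold_eq source prev prev PySem.Dict.empty PySem.Dict.empty
    (fun k r h => by simp [PySem.Dict.get?_empty] at h) hpre
  simp only [h]
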